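-- pv_equiv track=rewrite | github.com/AndrewSerra/csci-665 | hw_3/question_3/morseVowel.py | count_possible_vowels
-- ===== SOURCE A (Python) =====
-- def count_possible_vowels(symbols):
--     '''
--
--     '''
--     vowels = [".", ".-", "..", "..-", "---"]
--     dp = [0] * (len(symbols)+1)
--     dp[0] = 1
--
--     if len(symbols) <= 1:
--         return len(symbols)
--
--     for i in range(len(symbols)):
--         for v in vowels:
--             len_v = len(v)
--
--             if len_v <= (len(symbols) - i):
--                 dp[i+len_v] += dp[i] if symbols[i:i+len_v] == v else 0
--
--     return dp[-1]
-- ===== SOURCE B (Python) =====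
-- from functools import lru_cache
--
-- def count_possible_vowels(symbols):
--     n = len(symbols)
--     if n <= 1:
--         return n
--
--     @lru_cache(maxsize=None)
--     def ways(i):
--         if i == n:
--             return 1
--         total = 0
--         for v in (".", ".-", "..", "..-", "---"):
--             if symbols.startswith(v, i):
--                 total += ways(i + len(v))
--         return total
--
--     return ways(0)
-- ===== Notes on version B (the rewrite author's own statement) =====
-- stated objective: alternative
-- what changed: Replaces A's bottom-up forward-push dp array over prefixes by a top-down lru_cache-memoized recursion ways(i) over suffix start positions (keeping A's len<=1 early return); the recursion only visits positions reachable by a vowel tiling from the start, while A scans every position.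
import Mathlib
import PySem

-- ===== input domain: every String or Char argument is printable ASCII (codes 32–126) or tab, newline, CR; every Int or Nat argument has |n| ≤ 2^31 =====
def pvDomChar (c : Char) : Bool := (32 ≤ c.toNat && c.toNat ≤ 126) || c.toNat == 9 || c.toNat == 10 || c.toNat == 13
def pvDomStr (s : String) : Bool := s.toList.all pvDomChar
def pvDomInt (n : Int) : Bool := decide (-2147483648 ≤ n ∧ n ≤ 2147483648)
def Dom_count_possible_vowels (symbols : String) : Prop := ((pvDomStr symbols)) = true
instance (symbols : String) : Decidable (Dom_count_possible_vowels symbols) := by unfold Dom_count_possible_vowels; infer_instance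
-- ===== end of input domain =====

-- B replaces A's forward-push bottom-up table by a top-down memoized suffix recursion
-- (alternative decomposition, same values on every input).

-- ===== PORT A =====
-- the Morse codes of the five vowels, as character lists
def pvVowels : List (List Char) := [['.'], ['.', '-'], ['.', '.'], ['.', '.', '-'], ['-', '-', '-']]

-- the body of A's inner loop for one vowel v:
-- `dp[i+len_v] += dp[i] if symbols[i:i+len_v] == v else 0` under the guard `len_v <= len(symbols)-i`;
-- the slice is exact as `(chars.drop i).take lv = v` since 0 ≤ i and Python slices truncate like take-after-drop
def updA (chars : List Char) (i : Nat) (dp : List Int) (v : List Char) : List Int :=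
  if v.length ≤ chars.length - i then
    dp.set (i + v.length) (dp.getD (i + v.length) 0 + (if (chars.drop i).take v.length = v then dp.getD i 0 else 0))
  else dp

-- one iteration of A's outer loop (the inner `for v in vowels` loop)
def stepA (chars : List Char) (dp : List Int) (i : Nat) : List Int :=
  pvVowels.foldl (updA chars i) dp

def count_possible_vowels (symbols : String) : Int :=
  let chars := symbols.toList
  let n := chars.length
  let dp0 : List Int := (List.replicate (n + 1) (0 : Int)).set 0 1
  if n ≤ 1 then (n : Int)
  else
    let dp := (List.range n).foldl (stepA chars) dp0
    dp.getD n 0   -- dp[-1] = dp[n] since len(dp) = n+1 > 0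

-- ===== PORT B =====
-- B's memoized helper `ways(i)` over the suffix of the string starting at i, ported as a
-- recursion over the suffix character list (startswith(v, i) = v.isPrefixOf suffix);
-- the lru_cache is a pure evaluation device and does not change the computed value
def waysB : List Char → Int
  | [] => 1
  | c :: rest =>
    pvVowels.attach.foldl (fun acc v =>
      acc + (if v.1.isPrefixOf (c :: rest) then waysB ((c :: rest).drop v.1.length) else 0)) 0
termination_by s => s.length
decreasing_by
  obtain ⟨v, hv⟩ := v
  simp only [pvVowels, List.mem_cons, List.not_mem_nil, or_false] at hv
  simp only [List.length_drop, List.length_cons]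
  rcases hv with h|h|h|h|h <;> subst h <;> simp

def count_possible_vowels_alt (symbols : String) : Int :=
  let n := symbols.toList.length
  if n ≤ 1 then (n : Int) else waysB symbols.toList

-- ===== PRECONDITION & SPEC =====
def Spec_count_possible_vowels (symbols : String) (out : Int) : Prop := out = count_possible_vowels_alt symbols
instance (symbols : String) (out : Int) : Decidable (Spec_count_possible_vowels symbols out) := by unfold Spec_count_possible_vowels; infer_instance

-- ===== CLAIM (what is proved, stated in full; the proofs are below) =====
def Claim_equal_count_possible_vowels : Prop := ∀ (symbols : String), Dom_count_possible_vowels symbols → Spec_count_possible_vowels symbols (count_possible_vowels symbols)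

-- ===== LEMMAS AND PROOFS =====

-- Σ_{j=i}^{i+k-1} dp[j] * waysB (chars.drop j): the path-counting potential of dp from index i on
def phiAux (chars : List Char) (dp : List Int) : Nat → Nat → Int
  | _, 0 => 0
  | i, k + 1 => dp.getD i 0 * waysB (chars.drop i) + phiAux chars dp (i + 1) k

lemma waysB_nil : waysB [] = 1 := by rw [waysB]

lemma waysB_cons (c : Char) (rest : List Char) :
    waysB (c :: rest) =
      0 + (if [ '.' ].isPrefixOf (c :: rest) then waysB ((c :: rest).drop 1) else 0)
      + (if ['.', '-'].isPrefixOf (c :: rest) then waysB ((c :: rest).drop 2) else 0)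
      + (if ['.', '.'].isPrefixOf (c :: rest) then waysB ((c :: rest).drop 2) else 0)
      + (if ['.', '.', '-'].isPrefixOf (c :: rest) then waysB ((c :: rest).drop 3) else 0)
      + (if ['-', '-', '-'].isPrefixOf (c :: rest) then waysB ((c :: rest).drop 3) else 0) := by
  rw [waysB]
  simp [pvVowels, List.attach, List.attachWith, List.foldl]

lemma phiAux_congr (chars : List Char) (dp1 dp2 : List Int) (i k : Nat)
    (h : ∀ j, i ≤ j → j < i + k → dp1.getD j 0 = dp2.getD j 0) :
    phiAux chars dp1 i k = phiAux chars dp2 i k := by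
  induction k generalizing i with
  | zero => rfl
  | succ k ih =>
    simp only [phiAux]
    rw [h i (le_refl i) (by omega), ih (i + 1) (fun j hj hj2 => h j (by omega) (by omega))]

lemma getD_set_self (dp : List Int) (t : Nat) (x : Int) (h : t < dp.length) :
    (dp.set t x).getD t 0 = x := by
  simp [List.getD, h]

lemma getD_set_ne (dp : List Int) (t j : Nat) (x : Int) (h : t ≠ j) :
    (dp.set t x).getD j 0 = dp.getD j 0 := by
  simp [List.getD, h]

lemma phiAux_set_add (chars : List Char) (dp : List Int) (i k t : Nat) (x : Int)
    (h1 : i ≤ t) (h2 : t < i + k) (h3 : t < dp.length) :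
    phiAux chars (dp.set t (dp.getD t 0 + x)) i k
      = phiAux chars dp i k + x * waysB (chars.drop t) := by
  induction k generalizing i with
  | zero => omega
  | succ k ih =>
    simp only [phiAux]
    by_cases ht : t = i
    · subst ht
      rw [getD_set_self dp t _ h3,
        phiAux_congr chars (dp.set t (dp.getD t 0 + x)) dp (t + 1) k
          (fun j hj _ => getD_set_ne dp t j _ (by omega))]
      ring
    · rw [getD_set_ne dp t i _ (by omega), ih (i + 1) (by omega) (by omega)]
      ring

lemma updA_length (chars : List Char) (i : Nat) (dp : List Int) (v : List Char) :
    (updA chars i dp v).length = dp.length := by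
  unfold updA
  split_ifs <;> simp

lemma updA_getD_le (chars : List Char) (i j : Nat) (dp : List Int) (v : List Char)
    (hv : 1 ≤ v.length) (hj : j ≤ i) :
    (updA chars i dp v).getD j 0 = dp.getD j 0 := by
  unfold updA
  split_ifs with hg <;> first | rfl | exact getD_set_ne dp (i + v.length) j _ (by omega)

-- prefix ↔ the guard plus the slice comparison A makes
lemma prefix_iff_guard_take (chars v : List Char) (i : Nat) :
    v.isPrefixOf (chars.drop i) ↔ (v.length ≤ chars.length - i ∧ (chars.drop i).take v.length = v) := by
  rw [List.isPrefixOf_iff_prefix]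
  constructor
  · intro h
    have hlen := h.length_le
    simp only [List.length_drop] at hlen
    exact ⟨hlen, (List.prefix_iff_eq_take.mp h).symm⟩
  · rintro ⟨-, h⟩
    rw [← h]; exact List.take_prefix _ _

-- one conditional update of the inner loop: its effect on the potential over [i+1, n]
lemma updA_phi (chars : List Char) (dp : List Int) (i : Nat) (v : List Char)
    (hv : 1 ≤ v.length) (hi : i < chars.length) (hlen : dp.length = chars.length + 1) :
    phiAux chars (updA chars i dp v) (i + 1) (chars.length - i)
      = phiAux chars dp (i + 1) (chars.length - i)
        + dp.getD i 0 * (if v.isPrefixOf (chars.drop i) then waysB (chars.drop (i + v.length)) else 0) := by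
  unfold updA
  by_cases hg : v.length ≤ chars.length - i
  · simp only [hg, if_true]
    rw [phiAux_set_add chars dp (i + 1) (chars.length - i) (i + v.length) _ (by omega) (by omega) (by omega)]
    by_cases hm : (chars.drop i).take v.length = v
    · have : v.isPrefixOf (chars.drop i) := (prefix_iff_guard_take chars v i).mpr ⟨hg, hm⟩
      simp [hm, this, mul_comm]
    · have : ¬ v.isPrefixOf (chars.drop i) := fun h => hm ((prefix_iff_guard_take chars v i).mp h).2
      simp [hm, this]
  · have hnp : ¬ v.isPrefixOf (chars.drop i) := fun h => hg ((prefix_iff_guard_take chars v i).mp h).1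
    simp [hg, hnp]

lemma length_stepA (chars : List Char) (dp : List Int) (i : Nat) :
    (stepA chars dp i).length = dp.length := by
  simp [stepA, pvVowels, List.foldl, updA_length]

-- the crucial invariant step: one outer iteration preserves the potential
lemma phiAux_step (chars : List Char) (dp : List Int) (i : Nat)
    (hi : i < chars.length) (hlen : dp.length = chars.length + 1) :
    phiAux chars (stepA chars dp i) (i + 1) (chars.length - i)
      = phiAux chars dp i (chars.length - i + 1) := by
  obtain ⟨c, rest, hdrop⟩ : ∃ c rest, chars.drop i = c :: rest := by
    cases h : chars.drop i with
    | nil => exfalso; have := congrArg List.length h; simp at this; omega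
    | cons c rest => exact ⟨c, rest, rfl⟩
  have hv1 : (1:Nat) ≤ 1 := le_refl 1
  -- name the five intermediate dp's
  set d1 := updA chars i dp ['.'] with hd1
  set d2 := updA chars i d1 ['.', '-'] with hd2
  set d3 := updA chars i d2 ['.', '.'] with hd3
  set d4 := updA chars i d3 ['.', '.', '-'] with hd4
  set d5 := updA chars i d4 ['-', '-', '-'] with hd5
  have hstep : stepA chars dp i = d5 := by
    simp only [stepA, pvVowels, List.foldl, hd1, hd2, hd3, hd4, hd5]
  have l1 : d1.length = chars.length + 1 := by rw [hd1, updA_length, hlen]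
  have l2 : d2.length = chars.length + 1 := by rw [hd2, updA_length, l1]
  have l3 : d3.length = chars.length + 1 := by rw [hd3, updA_length, l2]
  have l4 : d4.length = chars.length + 1 := by rw [hd4, updA_length, l3]
  have g1 : d1.getD i 0 = dp.getD i 0 := by rw [hd1, updA_getD_le] <;> simp
  have g2 : d2.getD i 0 = dp.getD i 0 := by rw [hd2, updA_getD_le, g1] <;> simp
  have g3 : d3.getD i 0 = dp.getD i 0 := by rw [hd3, updA_getD_le, g2] <;> simp
  have g4 : d4.getD i 0 = dp.getD i 0 := by rw [hd4, updA_getD_le, g3] <;> simp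
  rw [hstep]
  rw [hd5, updA_phi chars d4 i _ (by simp) hi l4]
  rw [hd4, updA_phi chars d3 i _ (by simp) hi l3]
  rw [hd3, updA_phi chars d2 i _ (by simp) hi l2]
  rw [hd2, updA_phi chars d1 i _ (by simp) hi l1]
  rw [hd1, updA_phi chars dp i _ (by simp) hi hlen]
  rw [g1, g2, g3, g4]
  -- right-hand side: peel index i
  have hpeel : phiAux chars dp i (chars.length - i + 1)
      = dp.getD i 0 * waysB (chars.drop i) + phiAux chars dp (i + 1) (chars.length - i) := rfl
  rw [hpeel, hdrop, waysB_cons c rest]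
  have hdd : ∀ m : Nat, (c :: rest).drop m = chars.drop (i + m) := fun m => by
    rw [← hdrop, List.drop_drop]
  have L1 : ([ '.' ] : List Char).length = 1 := rfl
  have L2 : (['.', '-'] : List Char).length = 2 := rfl
  have L3 : (['.', '.'] : List Char).length = 2 := rfl
  have L4 : (['.', '.', '-'] : List Char).length = 3 := rfl
  have L5 : (['-', '-', '-'] : List Char).length = 3 := rfl
  rw [hdd 1, hdd 2, hdd 3, L1, L2, L3, L4, L5]
  ring

-- length of the folded dp
lemma length_foldl_stepA (chars : List Char) (dp0 : List Int) (l : List Nat) :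
    (l.foldl (stepA chars) dp0).length = dp0.length := by
  induction l generalizing dp0 with
  | nil => rfl
  | cons x xs ih => rw [List.foldl_cons, ih, length_stepA]

-- the loop invariant, iterated over range i
lemma phiAux_foldl (chars : List Char) (dp0 : List Int) (hlen : dp0.length = chars.length + 1) :
    ∀ i, i ≤ chars.length →
      phiAux chars ((List.range i).foldl (stepA chars) dp0) i (chars.length + 1 - i)
        = phiAux chars dp0 0 (chars.length + 1) := by
  intro i
  induction i with
  | zero => intro _; rfl
  | succ i ih =>
    intro hi
    rw [List.range_succ, List.foldl_append, List.foldl_cons, List.foldl_nil]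
    have hi' : i < chars.length := by omega
    have hlen' : ((List.range i).foldl (stepA chars) dp0).length = chars.length + 1 := by
      rw [length_foldl_stepA, hlen]
    have := phiAux_step chars ((List.range i).foldl (stepA chars) dp0) i hi' hlen'
    have harith : chars.length + 1 - (i + 1) = chars.length - i := by omega
    have harith2 : chars.length + 1 - i = chars.length - i + 1 := by omega
    rw [harith, this, ← harith2, ih (by omega)]

-- entries of the initial dp
lemma dp0_getD (n j : Nat) (hj : j ≤ n) :
    ((List.replicate (n + 1) (0 : Int)).set 0 1).getD j 0 = if j = 0 then 1 else 0 := by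
  by_cases h : j = 0
  · subst h
    rw [getD_set_self _ _ _ (by simp)]
    simp
  · rw [getD_set_ne _ _ _ _ (fun hh => h hh.symm)]
    simp [List.getD, Nat.lt_succ_of_le hj, h]

lemma phiAux_zero (chars : List Char) (dp : List Int) (i k : Nat)
    (h : ∀ j, i ≤ j → j < i + k → dp.getD j 0 = 0) :
    phiAux chars dp i k = 0 := by
  induction k generalizing i with
  | zero => rfl
  | succ k ih =>
    simp only [phiAux]
    rw [h i (le_refl i) (by omega), ih (i + 1) (fun j hj hj2 => h j (by omega) (by omega))]
    ring

-- the initial potential is waysB of the whole string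
lemma phiAux_init (chars : List Char) :
    phiAux chars ((List.replicate (chars.length + 1) (0 : Int)).set 0 1) 0 (chars.length + 1)
      = waysB chars := by
  simp only [phiAux]
  rw [dp0_getD chars.length 0 (by omega)]
  rw [phiAux_zero chars _ 1 chars.length
    (fun j hj hj2 => by rw [dp0_getD chars.length j (by omega)]; rw [if_neg (by omega)])]
  simp

-- A's dp[n] equals waysB
lemma dp_final (chars : List Char) :
    ((List.range chars.length).foldl (stepA chars)
        ((List.replicate (chars.length + 1) (0 : Int)).set 0 1)).getD chars.length 0
      = waysB chars := by
  have h := phiAux_foldl chars ((List.replicate (chars.length + 1) (0 : Int)).set 0 1)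
      (by simp) chars.length (le_refl _)
  rw [phiAux_init] at h
  have harith : chars.length + 1 - chars.length = 1 := by omega
  rw [harith] at h
  simp only [phiAux] at h
  rw [List.drop_length, waysB_nil] at h
  simpa using h

-- ===== VERDICT (by name: the statement is the Claim_ definition above) =====
theorem count_possible_vowels_spec : Claim_equal_count_possible_vowels := by
  unfold Claim_equal_count_possible_vowels Spec_count_possible_vowels
  intro symbols _
  show count_possible_vowels symbols = count_possible_vowels_alt symbols
  simp only [count_possible_vowels, count_possible_vowels_alt]
  by_cases h : symbols.toList.length ≤ 1
  · rw [if_pos h, if_pos h]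
  · rw [if_neg h, if_neg h]
    exact dp_final symbols.toList
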